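-- pv_equiv track=rewrite | github.com/ruanchaves/assin | utils_conv.py | kfold_iterator
-- ===== SOURCE A (Python) =====
-- def kfold_iterator(num_range):
--     range_list = list(range(num_range))
--     len_range_list = len(range_list)
--     iterations = 0
--     while iterations < len_range_list:
--         yield range_list
--         range_list = range_list[1:] + [range_list[0]]
--         iterations += 1
-- ===== SOURCE B (Python) =====
-- def kfold_iterator(num_range):
--     doubled = list(range(num_range)) * 2
--     n = len(doubled) // 2
--     for k in range(n):
--         yield doubled[k:k+n]
-- ===== Notes on version B (the rewrite author's own statement) =====
-- stated objective: alternative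
-- what changed: B materialises the circular sequence once as a doubled buffer and reads each rotation as the contiguous window doubled[k:k+n], instead of A's carrying a list and repeatedly moving its head to its tail.
import Mathlib
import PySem

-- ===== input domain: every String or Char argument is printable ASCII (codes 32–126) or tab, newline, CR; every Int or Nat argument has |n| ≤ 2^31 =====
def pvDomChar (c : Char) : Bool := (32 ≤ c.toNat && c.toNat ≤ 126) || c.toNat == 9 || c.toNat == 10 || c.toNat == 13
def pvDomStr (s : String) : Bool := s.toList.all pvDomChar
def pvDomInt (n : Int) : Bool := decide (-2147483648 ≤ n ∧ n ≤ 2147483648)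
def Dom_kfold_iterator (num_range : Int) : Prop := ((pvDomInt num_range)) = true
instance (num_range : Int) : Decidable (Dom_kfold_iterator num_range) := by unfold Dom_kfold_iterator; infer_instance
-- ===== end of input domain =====

-- B materialises the circular sequence once as a doubled buffer and reads each rotation as one
-- contiguous window doubled[k:k+n], maintaining no carried state; objective: alternative.

-- ===== PORT A =====
-- while loop with counter 'iterations < len_range_list', transcribed as countdown fuel
def kfoldLoopA : Nat → List Int → List (List Int)
  | 0, _ => []
  | m + 1, rl =>
      rl :: kfoldLoopA m (PySem.List.slice rl (some 1) none ++ (PySem.List.pyGet? rl 0).toList)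

def kfold_iterator (num_range : Int) : List (List Int) :=
  let range_list := PySem.List.pyRange 0 num_range 1
  let len_range_list := range_list.length
  kfoldLoopA len_range_list range_list

-- ===== PORT B =====
-- doubled = list(range(num_range)) * 2; n = len(doubled) // 2; yield doubled[k:k+n] for k in range(n)
def kfold_iterator_alt (num_range : Int) : List (List Int) :=
  let doubled := PySem.List.pyRange 0 num_range 1 ++ PySem.List.pyRange 0 num_range 1
  let n : Int := PySem.Int.floordiv (doubled.length : Int) 2
  (PySem.List.pyRange 0 n 1).map (fun k => PySem.List.slice doubled (some k) (some (k + n)))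

-- ===== PRECONDITION & SPEC =====
def Spec_kfold_iterator (num_range : Int) (out : List (List Int)) : Prop := out = kfold_iterator_alt num_range
instance (num_range : Int) (out : List (List Int)) : Decidable (Spec_kfold_iterator num_range out) := by unfold Spec_kfold_iterator; infer_instance

-- ===== CLAIM (what is proved, stated in full; the proofs are below) =====
def Claim_equal_kfold_iterator : Prop := ∀ (num_range : Int), Dom_kfold_iterator num_range → Spec_kfold_iterator num_range (kfold_iterator num_range)

-- ===== LEMMAS AND PROOFS =====

-- the k-th rotation of [0, …, n-1]
def rotL (n k : Nat) : List Int :=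
  PySem.List.pyRange (k : Int) (n : Int) 1 ++ PySem.List.pyRange 0 (k : Int) 1

theorem rot_step (n k : Nat) (hk : k < n) :
    PySem.List.slice (rotL n k) (some 1) none ++ (PySem.List.pyGet? (rotL n k) 0).toList
      = rotL n (k + 1) := by
  have hcons : PySem.List.pyRange (k : Int) (n : Int) 1
      = (k : Int) :: PySem.List.pyRange ((k : Int) + 1) (n : Int) 1 :=
    PySem.List.pyRange_one_cons (by exact_mod_cast hk)
  have hsucc : PySem.List.pyRange 0 ((k : Int) + 1) 1
      = PySem.List.pyRange 0 (k : Int) 1 ++ [(k : Int)] :=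
    PySem.List.pyRange_one_succ_right (by exact_mod_cast Nat.zero_le k)
  unfold rotL
  rw [hcons]
  simp [PySem.List.slice_from_one, PySem.List.pyGet?_zero_cons, hsucc]

theorem loop_eq (m k n : Nat) (h : k + m ≤ n) :
    kfoldLoopA m (rotL n k) = (List.range m).map (fun i => rotL n (k + i)) := by
  induction m generalizing k with
  | zero => simp [kfoldLoopA]
  | succ m ih =>
      have hk : k < n := by omega
      have := ih (k + 1) (by omega)
      simp only [kfoldLoopA, rot_step n k hk, this, List.range_succ_eq_map, List.map_cons,
        List.map_map]
      congr 1
      apply List.map_congr_left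
      intro a _
      simp only [Function.comp_apply]
      congr 1
      omega

theorem init_eq_rot (num_range : Int) :
    PySem.List.pyRange 0 num_range 1
      = rotL (PySem.List.pyRange 0 num_range 1).length 0 := by
  unfold rotL
  rw [PySem.List.pyRange_one, PySem.List.pyRange_one, PySem.List.pyRange_one]
  simp
  have h : num_range.toNat = (max num_range 0).toNat := by omega
  rw [h]

-- the k-th rotation is the window [k, k+n) of the doubled buffer
theorem rot_window (n k : Nat) (hk : k ≤ n) :
    PySem.List.slice (PySem.List.pyRange 0 (n : Int) 1 ++ PySem.List.pyRange 0 (n : Int) 1)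
        (some (k : Int)) (some ((k : Int) + (n : Int))) = rotL n k := by
  rw [PySem.List.slice_natCast_add]
  have hsplit : PySem.List.pyRange 0 (n : Int) 1
      = PySem.List.pyRange 0 (k : Int) 1 ++ PySem.List.pyRange (k : Int) (n : Int) 1 :=
    PySem.List.pyRange_one_append 0 k n (by exact_mod_cast Nat.zero_le k) (by exact_mod_cast hk)
  have hlk : (PySem.List.pyRange 0 (k : Int) 1).length = k := by
    rw [PySem.List.length_pyRange_one]; omega
  have hlkn : (PySem.List.pyRange (k : Int) (n : Int) 1).length = n - k := by
    rw [PySem.List.length_pyRange_one]; omega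
  conv_lhs => rw [hsplit, List.append_assoc]
  rw [List.drop_left' hlk, ← List.append_assoc,
    List.take_left' (by rw [List.length_append, hlk, hlkn]; omega)]
  unfold rotL
  rfl

theorem rot0 (n : Nat) : rotL n 0 = PySem.List.pyRange 0 (n : Int) 1 := by
  unfold rotL
  simp [PySem.List.pyRange_one_eq_nil (le_refl (0 : Int))]

-- ===== VERDICT (by name: the statement is the Claim_ definition above) =====
theorem kfold_iterator_spec : Claim_equal_kfold_iterator := by
  intro num_range _
  unfold Spec_kfold_iterator kfold_iterator kfold_iterator_alt
  set n := (PySem.List.pyRange 0 num_range 1).length with hn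
  have hdl : (PySem.List.pyRange 0 num_range 1 ++ PySem.List.pyRange 0 num_range 1).length
      = n + n := by rw [List.length_append, ← hn]
  have hfd : PySem.Int.floordiv (((PySem.List.pyRange 0 num_range 1
        ++ PySem.List.pyRange 0 num_range 1).length : Nat) : Int) 2 = (n : Int) := by
    rw [hdl]
    have : ((n + n : Nat) : Int) = ((n + n : Nat) : Int) := rfl
    rw [show ((2 : Int)) = ((2 : Nat) : Int) from rfl, PySem.Int.floordiv_natCast]
    congr 1
    omega
  simp only [hfd]
  rw [init_eq_rot num_range, ← hn]
  have hL : (rotL n 0).length = n := by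
    simp [rotL, PySem.List.length_pyRange_one]
  rw [hL, loop_eq n 0 n (by omega)]
  rw [PySem.List.pyRange_zero_natCast, List.map_map]
  apply List.map_congr_left
  intro i hi
  simp only [Function.comp_apply, Nat.zero_add]
  rw [rot0]
  exact (rot_window n i (Nat.le_of_lt (List.mem_range.mp hi))).symm
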